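-- pv_equiv track=rewrite | github.com/nardology/Bot-Nardology-Test | utils/badges.py | _badge_key_from_label
-- ===== SOURCE A (Python) =====
-- def _badge_key_from_label(label: str) -> str:
--     raw = (label or "").strip().lower()
--     out = []
--     prev_sep = False
--     for ch in raw:
--         if ch.isalnum():
--             out.append(ch)
--             prev_sep = False
--         else:
--             if not prev_sep:
--                 out.append("_")
--             prev_sep = True
--     key = "".join(out).strip("_")
--     key = key[:96] if key else "badge"
--     return f"devbadge:{key}"
-- ===== SOURCE B (Python) =====
-- def _badge_key_from_label(label: str) -> str:
--     raw = (label or "").strip().lower()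
--     pieces = []
--     i = 0
--     n = len(raw)
--     while i < n:
--         k = raw[i].isalnum()
--         j = i + 1
--         while j < n and raw[j].isalnum() == k:
--             j += 1
--         pieces.append(raw[i:j] if k else "_")
--         i = j
--     key = "".join(pieces).strip("_")
--     key = key[:96] if key else "badge"
--     return f"devbadge:{key}"
-- ===== Notes on version B (the rewrite author's own statement) =====
-- stated objective: alternative
-- what changed: Replaced A's char-by-char state machine carrying a prev_sep flag with a run-based two-pointer scan that emits each alnum run whole and one underscore per non-alnum run, then joins the pieces.
import Mathlib
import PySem

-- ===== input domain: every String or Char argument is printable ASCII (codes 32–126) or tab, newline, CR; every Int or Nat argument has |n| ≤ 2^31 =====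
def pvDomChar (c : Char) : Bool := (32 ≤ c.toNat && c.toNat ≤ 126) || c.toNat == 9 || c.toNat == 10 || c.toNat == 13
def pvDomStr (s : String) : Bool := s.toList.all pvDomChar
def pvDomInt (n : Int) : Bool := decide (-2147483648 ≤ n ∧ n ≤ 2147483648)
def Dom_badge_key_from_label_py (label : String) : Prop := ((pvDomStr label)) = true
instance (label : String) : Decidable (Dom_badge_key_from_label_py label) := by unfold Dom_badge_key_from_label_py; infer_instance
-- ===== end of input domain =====

-- B replaces A's prev_sep state-machine char loop with a run-based (groupby-style) two-pointer
-- scan that emits each alnum run whole and one underscore per non-alnum run: alternative decomposition.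


-- ===== PORT A =====
-- the loop body of A (state = (out, prev_sep)), named so the proofs can refer to it
def pvStepA (st : List Char × Bool) (ch : Char) : List Char × Bool :=
  if PySem.Chars.isalnum ch then (st.1 ++ [ch], false)
  else if !st.2 then (st.1 ++ ['_'], true) else (st.1, true)

def badge_key_from_label_py (label : String) : String :=
  let raw : List Char := PySem.Chars.lower (PySem.Chars.strip label.toList)
  let st := raw.foldl pvStepA ([], false)
  let key := PySem.Chars.stripChars st.1 ['_']
  let key := if key ≠ [] then PySem.List.slice key none (some 96) else "badge".toList
  String.mk ("devbadge:".toList ++ key)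

-- ===== PORT B =====
-- outer while loop of Source B: peel one run per step (the inner while = takeWhile/dropWhile on the rest)
def pvRuns (cs : List Char) : List (List Char) :=
  match cs with
  | [] => []
  | c :: rest =>
    let k := PySem.Chars.isalnum c
    let g := rest.takeWhile (fun d => PySem.Chars.isalnum d == k)
    let piece := if k then c :: g else ['_']
    piece :: pvRuns (rest.dropWhile (fun d => PySem.Chars.isalnum d == k))
termination_by cs.length
decreasing_by
  simp only [List.length_cons]
  exact Nat.lt_succ_of_le (List.length_dropWhile_le _ _)

def badge_key_from_label_py_alt (label : String) : String :=
  let raw : List Char := PySem.Chars.lower (PySem.Chars.strip label.toList)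
  let pieces := pvRuns raw
  let key := PySem.Chars.stripChars pieces.flatten ['_']
  let key := if key ≠ [] then PySem.List.slice key none (some 96) else "badge".toList
  String.mk ("devbadge:".toList ++ key)

-- ===== PRECONDITION & SPEC =====
def Spec_badge_key_from_label_py (label : String) (out : String) : Prop := out = badge_key_from_label_py_alt label
instance (label : String) (out : String) : Decidable (Spec_badge_key_from_label_py label out) := by unfold Spec_badge_key_from_label_py; infer_instance

-- ===== CLAIM (what is proved, stated in full; the proofs are below) =====
def Claim_equal_badge_key_from_label_py : Prop := ∀ (label : String), Dom_badge_key_from_label_py label → Spec_badge_key_from_label_py label (badge_key_from_label_py label)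

-- ===== LEMMAS AND PROOFS =====

-- common characterisation of the squashed string: one char at a time, skipping a non-alnum run
def pvSq (cs : List Char) : List Char :=
  match cs with
  | [] => []
  | c :: rest =>
    if PySem.Chars.isalnum c then c :: pvSq rest
    else '_' :: pvSq (rest.dropWhile (fun d => !PySem.Chars.isalnum d))
termination_by cs.length
decreasing_by
  · exact Nat.lt_succ_of_le (le_refl _)
  · exact Nat.lt_succ_of_le (List.length_dropWhile_le _ _)

theorem pvFoldA_char (cs : List Char) :
    (∀ out, (cs.foldl pvStepA (out, false)).1 = out ++ pvSq cs) ∧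
    (∀ out, (cs.foldl pvStepA (out, true)).1
        = out ++ pvSq (cs.dropWhile (fun d => !PySem.Chars.isalnum d))) := by
  induction cs with
  | nil => simp [pvSq]
  | cons c rest ih =>
    constructor
    · intro out
      by_cases h : PySem.Chars.isalnum c
      · rw [List.foldl_cons, show pvStepA (out, false) c = (out ++ [c], false) by
            simp [pvStepA, h], ih.1, pvSq, if_pos h]
        simp
      · rw [List.foldl_cons, show pvStepA (out, false) c = (out ++ ['_'], true) by
            simp [pvStepA, h], ih.2, pvSq, if_neg h]
        simp
    · intro out
      by_cases h : PySem.Chars.isalnum c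
      · rw [show List.dropWhile (fun d => !PySem.Chars.isalnum d) (c :: rest) = c :: rest by
            simp [h],
          List.foldl_cons, show pvStepA (out, true) c = (out ++ [c], false) by
            simp [pvStepA, h], ih.1, pvSq, if_pos h]
        simp
      · rw [show List.dropWhile (fun d => !PySem.Chars.isalnum d) (c :: rest)
              = List.dropWhile (fun d => !PySem.Chars.isalnum d) rest by
            simp [h],
          List.foldl_cons, show pvStepA (out, true) c = (out, true) by
            simp [pvStepA, h], ih.2]

theorem pvSq_alnum_prefix (cs : List Char) :
    cs.takeWhile (fun d => PySem.Chars.isalnum d) ++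
      pvSq (cs.dropWhile (fun d => PySem.Chars.isalnum d)) = pvSq cs := by
  induction cs with
  | nil => simp
  | cons c rest ih =>
    by_cases h : PySem.Chars.isalnum c
    · simp only [List.takeWhile_cons, List.dropWhile_cons, h, if_true, List.cons_append]
      rw [ih, pvSq, if_pos h]
    · simp [h]

theorem pvRuns_flatten (cs : List Char) : (pvRuns cs).flatten = pvSq cs := by
  induction cs using pvRuns.induct with
  | case1 => simp [pvRuns, pvSq]
  | case2 c rest k ih =>
    have hkv : k = PySem.Chars.isalnum c := rfl
    rw [hkv] at ih
    rw [pvRuns]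
    simp only [List.flatten_cons]
    by_cases h : PySem.Chars.isalnum c
    · have hk : (fun d => PySem.Chars.isalnum d == PySem.Chars.isalnum c)
          = fun d => PySem.Chars.isalnum d := by
        funext d; rw [h]; cases PySem.Chars.isalnum d <;> rfl
      rw [hk] at ih ⊢
      rw [if_pos h, ih, pvSq, if_pos h, List.cons_append, pvSq_alnum_prefix]
    · have hk : (fun d => PySem.Chars.isalnum d == PySem.Chars.isalnum c)
          = fun d => !PySem.Chars.isalnum d := by
        funext d
        rw [Bool.eq_false_iff.mpr h]
        cases PySem.Chars.isalnum d <;> rfl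
      rw [hk] at ih ⊢
      rw [if_neg h, ih, pvSq, if_neg h]
      simp

-- ===== VERDICT (by name: the statement is the Claim_ definition above) =====
theorem badge_key_from_label_py_spec : Claim_equal_badge_key_from_label_py := by
  intro label _
  unfold Spec_badge_key_from_label_py
  simp only [badge_key_from_label_py, badge_key_from_label_py_alt]
  rw [(pvFoldA_char _).1 [], pvRuns_flatten]
  simp
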